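-- pv_equiv track=rewrite | github.com/FelipeLSP/Python | Shop/Shop.py | menor_preco
-- ===== SOURCE A (Python) =====
-- def menor_preco(qtd_lojas,qtd_produtos,vetor_precos):
--
--     j=0
--     vetor_menores_precos=[]
--
--     for i in range(1, qtd_produtos + 1):
--         menor_preco_produto = vetor_precos[0][i]
--         for j in range(1, qtd_lojas):
--             if vetor_precos[j][i] < menor_preco_produto:
--                 menor_preco_produto = vetor_precos[j][i]
--         vetor_menores_precos.append(menor_preco_produto)
--
--     return vetor_menores_precos
-- ===== SOURCE B (Python) =====
-- def menor_preco(qtd_lojas, qtd_produtos, vetor_precos):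
--     minimos = []
--     for loja in vetor_precos[:qtd_lojas]:
--         precos = [loja[i] for i in range(1, qtd_produtos + 1)]
--         minimos = [min(m, p) for m, p in zip(minimos, precos)] if minimos else precos
--     return minimos
-- ===== Notes on version B (the rewrite author's own statement) =====
-- stated objective: alternative
-- what changed: B traverses the table row-wise in a single pass over the stores, maintaining a vector of running per-product minima updated by elementwise min (seeded from the first store's price list), instead of A's column-wise nested loops that rescan all stores once per product; for a positive product count Pre_ excludes store counts below 1 or above the number of rows, where A's use of row 0 alone is an accident of its seed (B returns the minima over the actually selected rows, here none).
-- outside the precondition, e.g. on menor_preco(0, 1, [[9, 1]]): A returns [1], B returns []; on menor_preco(-1, 1, [[9, 5], [8, 2], [7, 0]]): A returns [5], B returns [2]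
import Mathlib
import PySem

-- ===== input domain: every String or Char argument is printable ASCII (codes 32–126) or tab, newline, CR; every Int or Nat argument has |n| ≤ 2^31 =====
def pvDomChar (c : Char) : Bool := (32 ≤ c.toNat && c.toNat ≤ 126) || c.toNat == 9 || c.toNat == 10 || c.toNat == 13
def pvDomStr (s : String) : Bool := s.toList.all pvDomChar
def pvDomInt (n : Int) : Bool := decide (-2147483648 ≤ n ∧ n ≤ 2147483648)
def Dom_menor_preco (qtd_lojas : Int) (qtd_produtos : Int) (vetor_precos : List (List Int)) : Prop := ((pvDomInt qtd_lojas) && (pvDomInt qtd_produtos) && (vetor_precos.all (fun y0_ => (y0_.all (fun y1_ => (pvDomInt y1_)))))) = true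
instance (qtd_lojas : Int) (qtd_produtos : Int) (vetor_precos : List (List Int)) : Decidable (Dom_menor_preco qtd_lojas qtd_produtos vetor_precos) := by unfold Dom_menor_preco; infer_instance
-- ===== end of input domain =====

-- B makes one row-wise pass over the stores, keeping a vector of running per-product minima
-- updated by elementwise min, instead of A's column-wise nested index loops; objective: alternative.

-- ===== PORT A =====
def menor_preco (qtd_lojas : Int) (qtd_produtos : Int) (vetor_precos : List (List Int)) : List Int :=
  (PySem.List.pyRange 1 (qtd_produtos + 1) 1).foldl
    (fun acc i =>
      let menor0 := PySem.List.pyGetD (PySem.List.pyGetD vetor_precos 0 []) i 0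
      let menor := (PySem.List.pyRange 1 qtd_lojas 1).foldl
        (fun m j =>
          let v := PySem.List.pyGetD (PySem.List.pyGetD vetor_precos j []) i 0
          if v < m then v else m) menor0
      acc ++ [menor]) []

-- ===== PORT B =====
def menor_preco_alt (qtd_lojas : Int) (qtd_produtos : Int) (vetor_precos : List (List Int)) : List Int :=
  (PySem.List.slice vetor_precos none (some qtd_lojas)).foldl
    (fun minimos loja =>
      let precos := (PySem.List.pyRange 1 (qtd_produtos + 1) 1).map
        (fun i => PySem.List.pyGetD loja i 0)
      if minimos.isEmpty then precos
      else (minimos.zip precos).map (fun q => min q.1 q.2))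
    []

-- ===== PRECONDITION & SPEC =====
-- For a positive product count, Pre_ excludes store counts below 1 or above the number of rows
-- (there A either raises IndexError or its answer comes only from the accidental row-0 seed) and
-- tables whose selected rows do not reach column qtd_produtos (A raises IndexError there);
-- non-positive product counts stay inside (both programs return []).
def Pre_menor_preco (qtd_lojas : Int) (qtd_produtos : Int) (vetor_precos : List (List Int)) : Prop :=
  1 ≤ qtd_produtos →
    (1 ≤ qtd_lojas ∧ qtd_lojas ≤ (vetor_precos.length : Int) ∧
      ∀ r ∈ vetor_precos.take qtd_lojas.toNat, qtd_produtos < (r.length : Int))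
instance (qtd_lojas : Int) (qtd_produtos : Int) (vetor_precos : List (List Int)) : Decidable (Pre_menor_preco qtd_lojas qtd_produtos vetor_precos) := by unfold Pre_menor_preco; infer_instance

def pvWitness_menor_preco : Int × Int × List (List Int) := (2, 2, [[9, 1, 2], [9, 3, 1]])

def Spec_menor_preco (qtd_lojas : Int) (qtd_produtos : Int) (vetor_precos : List (List Int)) (out : List Int) : Prop := out = menor_preco_alt qtd_lojas qtd_produtos vetor_precos
instance (qtd_lojas : Int) (qtd_produtos : Int) (vetor_precos : List (List Int)) (out : List Int) : Decidable (Spec_menor_preco qtd_lojas qtd_produtos vetor_precos out) := by unfold Spec_menor_preco; infer_instance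

-- ===== CLAIM (what is proved, stated in full; the proofs are below) =====
def Claim_equal_menor_preco : Prop := ∀ (qtd_lojas : Int) (qtd_produtos : Int) (vetor_precos : List (List Int)), Dom_menor_preco qtd_lojas qtd_produtos vetor_precos → Pre_menor_preco qtd_lojas qtd_produtos vetor_precos → Spec_menor_preco qtd_lojas qtd_produtos vetor_precos (menor_preco qtd_lojas qtd_produtos vetor_precos)

-- ===== LEMMAS AND PROOFS =====

-- with no products requested every per-row price list is empty, so B's accumulator stays []
lemma foldl_empty_precos (rows : List (List Int)) :
    rows.foldl
      (fun minimos loja =>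
        if minimos.isEmpty then (([] : List Int).map (fun i => PySem.List.pyGetD loja i 0))
        else (minimos.zip (([] : List Int).map (fun i => PySem.List.pyGetD loja i 0))).map
          (fun q => min q.1 q.2))
      [] = [] := by
  induction rows with
  | nil => rfl
  | cons r rows ih => exact ih

lemma getD_zipmin (u r : List Int) (k : Nat) (hu : k < u.length) (hr : k < r.length) :
    ((u.zip r).map (fun q => min q.1 q.2)).getD k 0 = min (u.getD k 0) (r.getD k 0) := by
  rw [List.getD_eq_getElem _ _ (by simp; omega), List.getD_eq_getElem _ _ hu,
      List.getD_eq_getElem _ _ hr]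
  simp

-- once the accumulator is nonempty the isEmpty branch is dead
lemma foldl_if_zipmin (rs : List (List Int)) (u : List Int) (hu : u ≠ [])
    (h : ∀ row ∈ rs, u.length ≤ row.length) :
    rs.foldl
      (fun acc row => if acc.isEmpty then row else (acc.zip row).map (fun q => min q.1 q.2)) u
      = rs.foldl (fun acc row => (acc.zip row).map (fun q => min q.1 q.2)) u := by
  induction rs generalizing u with
  | nil => rfl
  | cons r rs ih =>
    have hr : u.length ≤ r.length := h r (List.mem_cons_self ..)
    simp only [List.foldl_cons, List.isEmpty_eq_false_iff.mpr hu, if_neg Bool.false_ne_true]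
    apply ih
    · intro hnil
      have : ((u.zip r).map (fun q => min q.1 q.2)).length = u.length := by simp; omega
      rw [hnil] at this
      simp at this
      exact hu (List.eq_nil_of_length_eq_zero this.symm)
    · intro row hrow
      have : ((u.zip r).map (fun q => min q.1 q.2)).length = u.length := by simp; omega
      rw [this]
      exact h row (List.mem_cons_of_mem _ hrow)

-- the row-wise elementwise-min fold computes, per column k, the running minimum over the rows
lemma foldl_zipmin (rs : List (List Int)) (u : List Int)
    (h : ∀ row ∈ rs, u.length ≤ row.length) :
    rs.foldl (fun acc row => (acc.zip row).map (fun q => min q.1 q.2)) u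
      = (List.range u.length).map
          (fun k => rs.foldl (fun m row => min m (row.getD k 0)) (u.getD k 0)) := by
  induction rs generalizing u with
  | nil =>
    simp only [List.foldl_nil]
    apply List.ext_getElem (by simp)
    intro k h1 h2
    simp only [List.getElem_map, List.getElem_range]
    rw [List.getD_eq_getElem _ _ h1]
  | cons r rs ih =>
    have hr : u.length ≤ r.length := h r (List.mem_cons_self ..)
    have hlen : ((u.zip r).map (fun q => min q.1 q.2)).length = u.length := by
      simp; omega
    simp only [List.foldl_cons]
    rw [ih _ (fun row hrow => by rw [hlen]; exact h row (List.mem_cons_of_mem _ hrow)), hlen]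
    apply List.map_congr_left
    intro k hk
    rw [List.mem_range] at hk
    rw [getD_zipmin u r k hk (lt_of_lt_of_le hk hr)]

lemma precos_len (loja : List Int) (P : Int) (hP : 0 ≤ P) :
    ((PySem.List.pyRange 1 (P + 1) 1).map (fun i => PySem.List.pyGetD loja i 0)).length
      = P.toNat := by
  rw [List.length_map, PySem.List.length_pyRange_one]
  omega

lemma precos_getD (loja : List Int) (P : Int) (k : Nat) (hk : k < P.toNat)
    (hrow : P < (loja.length : Int)) :
    ((PySem.List.pyRange 1 (P + 1) 1).map (fun i => PySem.List.pyGetD loja i 0)).getD k 0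
      = loja.getD (k + 1) 0 := by
  rw [← PySem.List.pyGetD_natCast]
  rw [PySem.List.pyGetD_map_pyRange_one _ 1 (P + 1) k 0 (by omega)]
  rw [PySem.List.pyGetD_eq_getElem _ _ (by omega) (by omega),
      List.getD_eq_getElem _ _ (by omega)]
  congr 1
  omega

lemma take_pyGetD (V : List (List Int)) (j n : Int) (h0 : 0 ≤ j) (hjn : j < n)
    (hn : n ≤ (V.length : Int)) :
    PySem.List.pyGetD V j [] = PySem.List.pyGetD (V.take n.toNat) j [] := by
  rw [PySem.List.pyGetD_eq_getElem _ _ h0 (by omega),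
      PySem.List.pyGetD_eq_getElem _ _ h0 (by simp; omega)]
  rw [List.getElem_take]

-- A's inner column scan, written as a fold over the remaining taken rows
lemma a_inner (L i : Int) (v0 : List Int) (vt : List (List Int))
    (hL1 : 1 ≤ L) (hL2 : L ≤ ((v0 :: vt).length : Int)) (hi1 : 1 ≤ i)
    (hlen : ∀ r ∈ (v0 :: vt).take L.toNat, i < (r.length : Int)) :
    (PySem.List.pyRange 1 L 1).foldl
        (fun m j =>
          let v := PySem.List.pyGetD (PySem.List.pyGetD (v0 :: vt) j []) i 0
          if v < m then v else m)
        (PySem.List.pyGetD (PySem.List.pyGetD (v0 :: vt) 0 []) i 0)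
      = (vt.take (L.toNat - 1)).foldl (fun m row => min m (row.getD i.toNat 0))
          (v0.getD i.toNat 0) := by
  set R := (v0 :: vt).take L.toNat with hRdef
  have hsucc : L.toNat = (L.toNat - 1) + 1 := by omega
  have hR : R = v0 :: vt.take (L.toNat - 1) := by
    rw [hRdef, hsucc, List.take_succ_cons]
    simp
  set rest := vt.take (L.toNat - 1) with hrestdef
  have hv0len : i < (v0.length : Int) := hlen v0 (hR ▸ List.mem_cons_self ..)
  have hinit : PySem.List.pyGetD (PySem.List.pyGetD (v0 :: vt) 0 []) i 0 = v0.getD i.toNat 0 := by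
    rw [PySem.List.pyGetD_zero_cons,
        PySem.List.pyGetD_eq_getElem v0 0 (by omega) (by omega),
        List.getD_eq_getElem v0 0 (by omega)]
  rw [hinit]
  have hRlen : (R.length : Int) = L := by
    have h' : R.length = min L.toNat (v0 :: vt).length := by
      rw [hRdef]; exact List.length_take ..
    simp only [List.length_cons] at h' hL2
    omega
  have step1 : (PySem.List.pyRange 1 L 1).foldl
      (fun m j =>
        let v := PySem.List.pyGetD (PySem.List.pyGetD (v0 :: vt) j []) i 0
        if v < m then v else m) (v0.getD i.toNat 0) =
      (PySem.List.pyRange 1 L 1).foldl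
      (fun m j =>
        let v := PySem.List.pyGetD (PySem.List.pyGetD R j []) i 0
        if v < m then v else m) (v0.getD i.toNat 0) := by
    apply PySem.List.foldl_congr_mem
    intro acc j hj
    have hj' := (PySem.List.mem_pyRange_one).mp hj
    rw [take_pyGetD (v0 :: vt) j L (by omega) hj'.2 hL2, ← hRdef]
  have step1b := PySem.List.foldl_pyRange_pyGetD' R []
    (fun m row => let v := PySem.List.pyGetD row i 0; if v < m then v else m)
    (v0.getD i.toNat 0) (a := 1) (by omega)
  rw [hRlen] at step1b
  beta_reduce at step1b
  have hdrop : R.drop (1 : Int).toNat = rest := by rw [hR]; rfl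
  rw [hdrop] at step1b
  rw [step1, step1b]
  apply PySem.List.foldl_congr_mem
  intro acc row hrow
  have hl : i < (row.length : Int) := hlen row (hR ▸ List.mem_cons_of_mem _ hrow)
  simp only
  rw [PySem.List.pyGetD_eq_getElem _ _ (by omega) (by omega),
      List.getD_eq_getElem _ _ (by omega)]
  rw [min_def]; split_ifs <;> omega

-- ===== VERDICT (by name: the statement is the Claim_ definition above) =====
theorem menor_preco_spec : Claim_equal_menor_preco := by
  intro L P V _ hpre
  unfold Spec_menor_preco
  simp only [menor_preco, menor_preco_alt]
  rcases lt_or_ge P 1 with hP | hP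
  · -- no products requested: both sides are []
    rw [show PySem.List.pyRange 1 (P + 1) 1 = [] from PySem.List.pyRange_one_eq_nil (by omega)]
    rw [foldl_empty_precos]
    rfl
  · obtain ⟨hL1, hL2, hrows⟩ := hpre hP
    have hP0 : 0 ≤ P := by omega
    have hVne : V ≠ [] := by
      intro h; subst h; simp at hL2; omega
    obtain ⟨v0, vt, rfl⟩ := List.exists_cons_of_ne_nil hVne
    set rest := vt.take (L.toNat - 1) with hrestdef
    have hRtake : (v0 :: vt).take L.toNat = v0 :: rest := by
      rw [show L.toNat = (L.toNat - 1) + 1 from by omega, List.take_succ_cons, hrestdef]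
    have hv0mem : v0 ∈ (v0 :: vt).take L.toNat := hRtake ▸ List.mem_cons_self ..
    have hv0 : P < (v0.length : Int) := hrows v0 hv0mem
    -- B side: peel the first store off the fold, then drop the dead isEmpty branch
    have hlojas : PySem.List.slice (v0 :: vt) none (some L) = v0 :: rest := by
      rw [PySem.List.slice_to _ (by omega), hRtake]
    rw [hlojas]
    rw [List.foldl_cons]
    simp only [List.isEmpty_nil, if_pos]
    rw [show (rest.foldl
        (fun minimos loja =>
          let precos := (PySem.List.pyRange 1 (P + 1) 1).map (fun i => PySem.List.pyGetD loja i 0)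
          if minimos.isEmpty then precos
          else (minimos.zip precos).map (fun q => min q.1 q.2))
        ((PySem.List.pyRange 1 (P + 1) 1).map (fun i => PySem.List.pyGetD v0 i 0))) =
       ((rest.map (fun loja =>
           (PySem.List.pyRange 1 (P + 1) 1).map (fun i => PySem.List.pyGetD loja i 0))).foldl
        (fun minimos row =>
          if minimos.isEmpty then row else (minimos.zip row).map (fun q => min q.1 q.2))
        ((PySem.List.pyRange 1 (P + 1) 1).map (fun i => PySem.List.pyGetD v0 i 0))) from
      (List.foldl_map (f := fun loja =>
          (PySem.List.pyRange 1 (P + 1) 1).map (fun i => PySem.List.pyGetD loja i 0))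
        (g := fun minimos row =>
          if minimos.isEmpty then row else (minimos.zip row).map (fun q => min q.1 q.2))
        (l := rest)
        (init := (PySem.List.pyRange 1 (P + 1) 1).map (fun i => PySem.List.pyGetD v0 i 0))).symm]
    have hu0len : ((PySem.List.pyRange 1 (P + 1) 1).map
        (fun i => PySem.List.pyGetD v0 i 0)).length = P.toNat := precos_len v0 P hP0
    have hmaplen : ∀ row ∈ rest.map (fun loja =>
          (PySem.List.pyRange 1 (P + 1) 1).map (fun i => PySem.List.pyGetD loja i 0)),
        ((PySem.List.pyRange 1 (P + 1) 1).map
          (fun i => PySem.List.pyGetD v0 i 0)).length ≤ row.length := by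
      intro row hrow
      rw [List.mem_map] at hrow
      obtain ⟨loja, hmem, rfl⟩ := hrow
      rw [hu0len, precos_len loja P hP0]
    rw [foldl_if_zipmin _ _ (by
        intro hnil
        rw [hnil] at hu0len
        simp at hu0len
        omega) hmaplen]
    rw [foldl_zipmin _ _ hmaplen, hu0len]
    -- A side: each product column is an independent scan of the selected rows
    rw [PySem.List.foldl_append_singleton_eq_map, List.nil_append]
    apply List.ext_getElem
    · rw [List.length_map, List.length_map, PySem.List.length_pyRange_one, List.length_range]
      omega
    · intro k h1 h2
      have hk : k < P.toNat := by
        rw [List.length_map, List.length_range] at h2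
        exact h2
      simp only [List.getElem_map, PySem.List.getElem_pyRange_one, List.getElem_range]
      have hik : (1 + (k : Int)).toNat = k + 1 := by omega
      have hi1 : 1 ≤ 1 + (k : Int) := by omega
      have hicols : ∀ r ∈ (v0 :: vt).take L.toNat, 1 + (k : Int) < (r.length : Int) := by
        intro r hr
        have := hrows r hr
        omega
      rw [a_inner L (1 + (k : Int)) v0 vt hL1 hL2 hi1 hicols, hik, ← hrestdef]
      rw [List.foldl_map]
      rw [precos_getD v0 P k hk hv0]
      apply PySem.List.foldl_congr_mem
      intro acc loja hmem
      have : P < (loja.length : Int) := hrows loja (hRtake ▸ List.mem_cons_of_mem _ hmem)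
      rw [precos_getD loja P k hk this]
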